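-- pv_equiv track=rewrite | github.com/jonathf/matlab2cpp | matlab2cpp/datatype.py | get_dim
-- ===== SOURCE A (Python) =====
-- dim0 = {"int", "float", "double", "uword", "cx_double"}
--
-- dim1 = {"ivec", "fvec", "uvec", "vec", "cx_vec"}
--
-- dim2 = {"irowvec", "frowvec", "urowvec", "rowvec", "cx_rowvec"}
--
-- dim3 = {"imat", "fmat", "umat", "mat", "cx_mat"}
--
-- dim4 = {"icube", "fcube", "ucube", "cube", "cx_cube"}
--
-- others = {"char", "string", "TYPE", "func_lambda", "struct", "structs", "cell",
--         "wall_clock"}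
--
-- def get_dim(val):
--
--     while val[-1] == "*":
--         val = val[:-1]
--
--     if val in dim0:     dim = 0
--     elif val in dim1:   dim = 1
--     elif val in dim2:   dim = 2
--     elif val in dim3:   dim = 3
--     elif val in dim4:   dim = 4
--     elif val in others: dim = None
--     else:
--         raise ValueError("%s not recognized" % val)
--     return dim
-- ===== SOURCE B (Python) =====
-- _PREFIXES = ("", "i", "f", "u", "cx_")
-- _SUFFIX_DIMS = (("rowvec", 2), ("vec", 1), ("mat", 3), ("cube", 4))
-- _SCALARS = ("int", "float", "double", "uword", "cx_double")
-- _OTHERS = ("char", "string", "TYPE", "func_lambda", "struct", "structs",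
--            "cell", "wall_clock")
--
-- def get_dim(val):
--     while val[-1] == "*":
--         val = val[:-1]
--     # Armadillo container names are <prefix><base>: base fixes the dimension,
--     # prefix is one of "", "i", "f", "u", "cx_".  Check "rowvec" before "vec".
--     for base, d in _SUFFIX_DIMS:
--         if val.endswith(base) and val[:len(val) - len(base)] in _PREFIXES:
--             return d
--     if val in _SCALARS:
--         return 0
--     if val in _OTHERS:
--         return None
--     raise ValueError("%s not recognized" % val)
-- ===== Notes on version B (the rewrite author's own statement) =====
-- stated objective: alternative
-- what changed: Dims 1-4 are no longer looked up per-name: B parses the Armadillo naming structure, matching the base suffix (rowvec/vec/mat/cube, which fixes the dimension) and validating the element-type prefix against {'', 'i', 'f', 'u', 'cx_'}; only scalars and non-numeric types remain membership tests.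
import Mathlib
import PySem

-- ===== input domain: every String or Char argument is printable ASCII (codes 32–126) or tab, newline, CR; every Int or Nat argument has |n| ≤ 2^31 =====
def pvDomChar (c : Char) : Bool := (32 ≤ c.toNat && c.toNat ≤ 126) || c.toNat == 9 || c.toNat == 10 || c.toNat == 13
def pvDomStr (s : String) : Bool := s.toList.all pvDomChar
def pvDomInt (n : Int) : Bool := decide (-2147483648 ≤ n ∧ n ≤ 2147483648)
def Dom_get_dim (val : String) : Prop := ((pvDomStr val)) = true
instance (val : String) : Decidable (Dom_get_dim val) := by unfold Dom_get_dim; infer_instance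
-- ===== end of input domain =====

set_option maxRecDepth 4096


-- B determines dims 1-4 structurally (base suffix rowvec/vec/mat/cube + element-type
-- prefix in {"", "i", "f", "u", "cx_"}) instead of A's six per-name set-membership branches.

-- Python `while val[-1] == "*": val = val[:-1]`, working from the end of the string.
-- On the empty string Python raises IndexError (excluded by Pre_); both A and B contain
-- this identical loop, so it is shared.
def stripStarsRev : List Char → List Char
  | [] => []                                   -- val[-1] raises IndexError here
  | c :: r => if c = '*' then stripStarsRev r else c :: r

def stripStars (val : String) : String := String.ofList (stripStarsRev val.toList.reverse).reverse

-- ===== PORT A =====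
def pyDim0 : List String := ["int", "float", "double", "uword", "cx_double"]
def pyDim1 : List String := ["ivec", "fvec", "uvec", "vec", "cx_vec"]
def pyDim2 : List String := ["irowvec", "frowvec", "urowvec", "rowvec", "cx_rowvec"]
def pyDim3 : List String := ["imat", "fmat", "umat", "mat", "cx_mat"]
def pyDim4 : List String := ["icube", "fcube", "ucube", "cube", "cx_cube"]
def pyOthers : List String := ["char", "string", "TYPE", "func_lambda", "struct", "structs", "cell", "wall_clock"]

def get_dim (val : String) : Option Int :=
  let v := stripStars val
  if pyDim0.contains v then some 0
  else if pyDim1.contains v then some 1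
  else if pyDim2.contains v then some 2
  else if pyDim3.contains v then some 3
  else if pyDim4.contains v then some 4
  else if pyOthers.contains v then none
  else none                                    -- raise ValueError (excluded by Pre_)

-- ===== PORT B =====
def pvPrefixes : List (List Char) := ["".toList, "i".toList, "f".toList, "u".toList, "cx_".toList]
def pvSuffixDims : List (List Char × Int) := [("rowvec".toList, 2), ("vec".toList, 1), ("mat".toList, 3), ("cube".toList, 4)]
def pvScalarsB : List String := ["int", "float", "double", "uword", "cx_double"]
def pvOthersB : List String := ["char", "string", "TYPE", "func_lambda", "struct", "structs", "cell", "wall_clock"]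

-- Source B's `for base, d in _SUFFIX_DIMS:` loop; val[:len(val)-len(base)] is a Python slice
-- (ported exactly with PySem.List.slice, clamping a negative bound as Python does).
def pvSuffixLoop (v : List Char) : List (List Char × Int) → Option Int
  | [] => none
  | (base, d) :: rest =>
    if PySem.Chars.endswith v base
        && pvPrefixes.contains (PySem.List.slice v none (some ((v.length : Int) - base.length)))
    then some d
    else pvSuffixLoop v rest

def get_dim_alt (val : String) : Option Int :=
  let v := stripStars val
  match pvSuffixLoop v.toList pvSuffixDims with
  | some d => some d
  | none =>
    if pvScalarsB.contains v then some 0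
    else if pvOthersB.contains v then none
    else none                                  -- raise ValueError (excluded by Pre_)

-- ===== PRECONDITION & SPEC =====
-- all type names A recognizes (the union of the six Python sets)
def pvKnownTypes : List String :=
  ["int", "float", "double", "uword", "cx_double",
   "ivec", "fvec", "uvec", "vec", "cx_vec",
   "irowvec", "frowvec", "urowvec", "rowvec", "cx_rowvec",
   "imat", "fmat", "umat", "mat", "cx_mat",
   "icube", "fcube", "ucube", "cube", "cx_cube",
   "char", "string", "TYPE", "func_lambda", "struct", "structs", "cell", "wall_clock"]

-- Pre_ excludes exactly the inputs on which A raises: IndexError when stripping trailing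
-- stars empties the string, ValueError when the stripped name is not a known type.
def Pre_get_dim (val : String) : Prop :=
  String.ofList ((val.toList.reverse.dropWhile (· == '*')).reverse) ∈ pvKnownTypes
instance (val : String) : Decidable (Pre_get_dim val) := by unfold Pre_get_dim; infer_instance

def pvWitness_get_dim : String := "mat*"

def Spec_get_dim (val : String) (out : Option Int) : Prop := out = get_dim_alt val
instance (val : String) (out : Option Int) : Decidable (Spec_get_dim val out) := by unfold Spec_get_dim; infer_instance

-- ===== CLAIM (what is proved, stated in full; the proofs are below) =====
def Claim_equal_get_dim : Prop := ∀ (val : String), Dom_get_dim val → Pre_get_dim val → Spec_get_dim val (get_dim val)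

-- ===== LEMMAS AND PROOFS =====

-- stripStarsRev is Pre_'s dropWhile
theorem stripStarsRev_eq (l : List Char) : stripStarsRev l = l.dropWhile (· == '*') := by
  induction l with
  | nil => rfl
  | cons c r ih =>
    simp only [stripStarsRev, List.dropWhile_cons]
    by_cases h : c = '*' <;> simp [h, ih]

-- on every known type name A's six-way membership chain and B's structural
-- suffix/prefix classification agree
theorem table_eq (v : String) (hv : v ∈ pvKnownTypes) :
    (if pyDim0.contains v then (some 0 : Option Int)
     else if pyDim1.contains v then some 1
     else if pyDim2.contains v then some 2
     else if pyDim3.contains v then some 3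
     else if pyDim4.contains v then some 4
     else if pyOthers.contains v then none
     else none)
    = (match pvSuffixLoop v.toList pvSuffixDims with
       | some d => some d
       | none =>
         if pvScalarsB.contains v then some 0
         else if pvOthersB.contains v then none
         else none) := by
  fin_cases hv <;> decide

-- ===== VERDICT (by name: the statement is the Claim_ definition above) =====
theorem get_dim_spec : Claim_equal_get_dim := by
  intro val _ hpre
  show get_dim val = get_dim_alt val
  have hv : stripStars val ∈ pvKnownTypes := by
    unfold Pre_get_dim at hpre
    simpa [stripStars, stripStarsRev_eq] using hpre
  simp only [get_dim, get_dim_alt]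
  exact table_eq (stripStars val) hv
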